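-- pv_equiv track=rewrite | github.com/shiva-aditya/codemind-python | minimum_vowel_count_words.py | po
-- ===== SOURCE A (Python) =====
-- def po(a):
--     ans=[]
--     y="aeiou"
--     for i in a:
--         c=0
--         for j in i:
--             if j in y:
--                 c+=1
--         ans.append(c)
--     return ans.count(min(ans))
-- ===== SOURCE B (Python) =====
-- def po(a):
--     best = None
--     freq = 0
--     for w in a:
--         c = sum(1 for ch in w if ch in "aeiou")
--         if best is None or c < best:
--             best, freq = c, 1
--         elif c == best:
--             freq += 1
--     return freq
-- ===== Notes on version B (the rewrite author's own statement) =====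
-- stated objective: alternative
-- what changed: B replaces A's build-the-full-count-list-then-min-then-count (three passes and an intermediate list) with a single pass keeping only the running minimum vowel count and its frequency.
-- outside the precondition, e.g. on po([]): A raises ValueError, B returns 0
import Mathlib
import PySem

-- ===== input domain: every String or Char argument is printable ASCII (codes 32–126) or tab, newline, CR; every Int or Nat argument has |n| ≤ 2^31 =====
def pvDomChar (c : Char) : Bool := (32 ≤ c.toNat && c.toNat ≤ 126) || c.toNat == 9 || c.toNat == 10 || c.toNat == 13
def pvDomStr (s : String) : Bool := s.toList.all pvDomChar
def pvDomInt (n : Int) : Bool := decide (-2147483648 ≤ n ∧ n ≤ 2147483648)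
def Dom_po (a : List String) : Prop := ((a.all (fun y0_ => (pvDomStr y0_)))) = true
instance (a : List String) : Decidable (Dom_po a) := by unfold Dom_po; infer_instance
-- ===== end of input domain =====

-- B makes one pass keeping the running minimum vowel count and its frequency, instead of
-- A's count list followed by min() and .count(); return values proved equal on nonempty input.

-- ===== PORT A =====
-- A: build ans = list of vowel counts, then return ans.count(min(ans))
def po (a : List String) : Int :=
  let ans : List Int := a.foldl (fun acc i =>
    acc ++ [i.toList.foldl (fun c j => if j ∈ "aeiou".toList then c + 1 else c) (0 : Int)]) []
  match PySem.List.min? ans (fun x => x) with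
  | some m => (PySem.List.count ans m : Int)   -- min([]) raises ValueError → Pre_po excludes a = []
  | none => 0

-- ===== PORT B =====
-- B: c = sum(1 for ch in w if ch in "aeiou") ported as countP (a sum of ones over the filter)
def poAltCount (w : String) : Int :=
  (w.toList.countP (fun ch => ch ∈ "aeiou".toList) : Nat)

def po_alt (a : List String) : Int :=
  let st := a.foldl (fun (st : Option Int × Int) w =>
    let c := poAltCount w
    match st.1 with
    | none => (some c, 1)
    | some b => if c < b then (some c, 1) else if c = b then (some b, st.2 + 1) else st)
    ((none, 0) : Option Int × Int)
  st.2

-- ===== PRECONDITION & SPEC =====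
-- Pre_po excludes only the empty list, on which A's min([]) raises ValueError.
def Pre_po (a : List String) : Prop := a ≠ []
instance (a : List String) : Decidable (Pre_po a) := by unfold Pre_po; infer_instance
def pvWitness_po : List String := (["abc", "xyz"])

def Spec_po (a : List String) (out : Int) : Prop := out = po_alt a
instance (a : List String) (out : Int) : Decidable (Spec_po a out) := by unfold Spec_po; infer_instance

-- ===== CLAIM (what is proved, stated in full; the proofs are below) =====
def Claim_equal_po : Prop := ∀ (a : List String), Dom_po a → Pre_po a → Spec_po a (po a)

-- ===== LEMMAS AND PROOFS =====

-- B's loop step, on the vowel-count values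
def stepV (st : Option Int × Int) (c : Int) : Option Int × Int :=
  match st.1 with
  | none => (some c, 1)
  | some b => if c < b then (some c, 1) else if c = b then (some b, st.2 + 1) else st

-- invariant of B's loop once the first element has been seen
theorem stepV_loop (vs : List Int) (b k : Int) :
    vs.foldl stepV (some b, k) =
      (some (vs.foldl min b),
       (if vs.foldl min b = b then k else 0) + (vs.count (vs.foldl min b) : Int)) := by
  induction vs generalizing b k with
  | nil => simp
  | cons c vs ih =>
    simp only [List.foldl_cons, stepV]
    rcases lt_trichotomy c b with h | h | h
    · have hmin : min b c = c := by omega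
      rw [if_pos h, ih]
      simp only [hmin]
      have hle := (PySem.List.foldl_min_le vs c).1
      have hne : vs.foldl min c ≠ b := by omega
      simp [hne]
      rcases eq_or_ne (vs.foldl min c) c with he | he
      · simp [he]
        omega
      · simp [he, Ne.symm he]
    · subst h
      rw [if_neg (lt_irrefl c), if_pos rfl, ih]
      simp only [min_self, List.count_cons]
      rcases eq_or_ne (vs.foldl min c) c with he | he
      · simp [he]; omega
      · simp [he, Ne.symm he]
    · have hmin : min b c = b := by omega
      rw [if_neg (by omega : ¬ c < b), if_neg (by omega : ¬ c = b), ih]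
      simp only [hmin]
      have hle := (PySem.List.foldl_min_le vs b).1
      have hne : c ≠ vs.foldl min b := by omega
      simp [hne]

theorem po_spec : Claim_equal_po := by
  intro a _ hpre
  unfold Spec_po po po_alt
  -- name A's per-word vowel count and rewrite both ports through it
  have hfc : ∀ w : String, poAltCount w =
      w.toList.foldl (fun c j => if j ∈ "aeiou".toList then c + 1 else c) (0 : Int) := by
    intro w
    simp [poAltCount, PySem.List.foldl_ite_add_one]
  have hans := PySem.List.foldl_append_singleton_eq_map
    (fun i : String => i.toList.foldl (fun c j => if j ∈ "aeiou".toList then c + 1 else c) (0 : Int))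
    a ([] : List Int)
  simp only [List.nil_append] at hans
  have hB : (a.foldl (fun (st : Option Int × Int) w =>
        match st.1 with
        | none => (some (poAltCount w), 1)
        | some b => if poAltCount w < b then (some (poAltCount w), 1)
                    else if poAltCount w = b then (some b, st.2 + 1) else st)
        ((none, 0) : Option Int × Int)) =
      ((a.map (fun i : String => i.toList.foldl (fun c j => if j ∈ "aeiou".toList then c + 1 else c) (0 : Int))).foldl
        stepV ((none, 0) : Option Int × Int)) := by
    rw [List.foldl_map]
    congr 1
    funext st w
    simp only [stepV, hfc]
  rw [hans]
  rw [hB]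
  rcases a with _ | ⟨x, t⟩
  · exact absurd rfl hpre
  · simp only [List.map_cons, PySem.List.min?_id_cons, List.foldl_cons]
    rw [show stepV ((none, 0) : Option Int × Int)
          (x.toList.foldl (fun c j => if j ∈ "aeiou".toList then c + 1 else c) (0 : Int)) =
        (some (x.toList.foldl (fun c j => if j ∈ "aeiou".toList then c + 1 else c) (0 : Int)), 1) from rfl,
      stepV_loop]
    simp only [PySem.List.count_eq, List.count_cons]
    set fx : Int := x.toList.foldl (fun c j => if j ∈ "aeiou".toList then c + 1 else c) (0 : Int) with hfx
    set vs : List Int :=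
      t.map (fun i : String => i.toList.foldl (fun c j => if j ∈ "aeiou".toList then c + 1 else c) (0 : Int)) with hvs
    rcases eq_or_ne (vs.foldl min fx) fx with he | he
    · rw [he]
      simp
      omega
    · simp only [beq_iff_eq]
      rw [if_neg (fun h => he h.symm), if_neg he]
      push_cast
      omega
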